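-- pv_equiv track=rewrite | github.com/heesoon/algorithm | Creative_algorithms_for_problem_solving_(intermediate)/Problem_07/python/test.py | solve
-- ===== SOURCE A (Python) =====
-- def solve(v, n, w):
--     r = 0
--     for i in range(n - w):
--         ir = 0
--         for j in range(i, i + w):
--             ir += v[j]
--
--         if(ir > r):
--             r = ir
--
--     return r
-- ===== SOURCE B (Python) =====
-- def solve(v, n, w):
--     m = n - w
--     if m <= 0 or w <= 0:
--         return 0
--     s = sum(v[:w])
--     best = s
--     for i in range(1, m):
--         s += v[i + w - 1] - v[i - 1]
--         if s > best:
--             best = s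
--     return best if best > 0 else 0
-- ===== Notes on version B (the rewrite author's own statement) =====
-- stated objective: alternative
-- what changed: Replaced A's per-window re-summation (an inner loop over each window) by a single sliding-window pass that maintains one running window sum, updated by adding the entering element and subtracting the leaving one.
import Mathlib
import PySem

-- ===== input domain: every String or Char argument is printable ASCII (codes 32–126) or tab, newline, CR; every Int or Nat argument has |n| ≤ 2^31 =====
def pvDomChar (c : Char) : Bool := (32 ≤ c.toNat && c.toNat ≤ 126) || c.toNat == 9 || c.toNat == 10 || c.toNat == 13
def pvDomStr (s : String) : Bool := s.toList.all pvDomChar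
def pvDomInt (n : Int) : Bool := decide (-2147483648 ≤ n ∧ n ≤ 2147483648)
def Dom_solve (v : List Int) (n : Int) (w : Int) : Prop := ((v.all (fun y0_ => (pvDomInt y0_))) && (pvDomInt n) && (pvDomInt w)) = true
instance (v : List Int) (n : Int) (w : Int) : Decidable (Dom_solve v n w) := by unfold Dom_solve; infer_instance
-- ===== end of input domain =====

-- B replaces A's per-window re-summation by a single sliding pass with an incrementally updated running window sum; return value only.

-- ===== PORT A =====
-- Literal port of A: for each window start i, sum v[i..i+w-1] with an inner loop; keep the max seen (r starts at 0).
-- v[j] is totalized as pyGetD; Pre_solve excludes exactly the inputs where Python's v[j] raises IndexError.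
def solve (v : List Int) (n : Int) (w : Int) : Int :=
  (PySem.List.pyRange 0 (n - w) 1).foldl
    (fun r i =>
      let ir := (PySem.List.pyRange i (i + w) 1).foldl
        (fun ir j => ir + PySem.List.pyGetD v j 0) 0
      if ir > r then ir else r) 0

-- ===== PORT B =====
-- Port of Source B: first window sum via a slice, then slide by one, updating the sum incrementally.
def solve_alt (v : List Int) (n : Int) (w : Int) : Int :=
  let m := n - w
  if m ≤ 0 ∨ w ≤ 0 then 0
  else
    let s0 := (PySem.List.slice v none (some w)).sum
    let p := (PySem.List.pyRange 1 m 1).foldl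
      (fun (p : Int × Int) i =>
        let s := p.1 + PySem.List.pyGetD v (i + w - 1) 0 - PySem.List.pyGetD v (i - 1) 0
        (s, if s > p.2 then s else p.2)) (s0, s0)
    if p.2 > 0 then p.2 else 0

-- ===== PRECONDITION & SPEC =====
-- Excludes exactly the inputs where A raises IndexError: windows exist (0 < n - w, 0 < w) but the
-- largest accessed index n - 2 falls beyond the list.
def Pre_solve (v : List Int) (n : Int) (w : Int) : Prop :=
  n - w ≤ 0 ∨ w ≤ 0 ∨ n ≤ (v.length : Int) + 1
instance (v : List Int) (n : Int) (w : Int) : Decidable (Pre_solve v n w) := by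
  unfold Pre_solve; infer_instance

def pvWitness_solve : List Int × Int × Int := ([3, -1, 4, 1, 5], 5, 2)

def Spec_solve (v : List Int) (n : Int) (w : Int) (out : Int) : Prop := out = solve_alt v n w
instance (v : List Int) (n : Int) (w : Int) (out : Int) : Decidable (Spec_solve v n w out) := by unfold Spec_solve; infer_instance

-- ===== CLAIM (what is proved, stated in full; the proofs are below) =====
def Claim_equal_solve : Prop := ∀ (v : List Int) (n : Int) (w : Int), Dom_solve v n w → Pre_solve v n w → Spec_solve v n w (solve v n w)

-- ===== LEMMAS AND PROOFS =====

-- window sum of width w starting at i, as the sum of the indexed values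
def pvS (v : List Int) (w i : Int) : Int :=
  ((PySem.List.pyRange i (i + w) 1).map (fun j => PySem.List.pyGetD v j 0)).sum

-- A's inner loop computes pvS
theorem pv_inner_eq (v : List Int) (w i : Int) :
    (PySem.List.pyRange i (i + w) 1).foldl (fun ir j => ir + PySem.List.pyGetD v j 0) 0
      = pvS v w i := by
  simp [pvS, PySem.List.foldl_add]

-- sliding-window shift: moving the window one step right adds the new element and drops the old
theorem pv_shift (v : List Int) (w i : Int) (hw : 0 ≤ w) :
    pvS v w (i + 1) = pvS v w i + PySem.List.pyGetD v (i + w) 0 - PySem.List.pyGetD v i 0 := by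
  unfold pvS
  rcases eq_or_lt_of_le hw with h0 | h0
  · subst h0
    simp [PySem.List.pyRange_one_eq_nil]
  · rw [PySem.List.pyRange_one_cons (by omega : i < i + w),
        show i + 1 + w = (i + w) + 1 by ring,
        PySem.List.pyRange_one_succ_right (by omega : i + 1 ≤ i + w)]
    simp
    ring

-- max pulled out of a running max of a projection
theorem pv_foldl_max_out (l : List Int) (f : Int → Int) (c a : Int) :
    l.foldl (fun b i => max b (f i)) (max c a) = max c (l.foldl (fun b i => max b (f i)) a) := by
  induction l generalizing a with
  | nil => rfl
  | cons x t ih => simp only [List.foldl_cons, max_assoc, ih]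

-- the running-max step A/B use is max
theorem pv_mx_eq (r x : Int) : (if x > r then x else r) = max r x := by
  rcases lt_or_ge r x with h | h <;> simp [max_def] <;> omega

-- sum over range k of defaulted lookups is the sum of the first k elements
theorem pv_sum_range_take (v : List Int) (k : Nat) :
    ((List.range k).map (fun j => v.getD j 0)).sum = (v.take k).sum := by
  induction k with
  | zero => simp
  | succ k ih =>
    rw [List.range_succ, List.map_append, List.sum_append, ih, List.take_add_one,
        List.sum_append]
    cases h : v[k]? <;> simp [List.getD_eq_getElem?_getD, h]

-- B's first slice sum is the width-w window sum at 0
theorem pv_slice_eq (v : List Int) (w : Int) (hw : 0 ≤ w) :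
    (PySem.List.slice v none (some w)).sum = pvS v w 0 := by
  rw [show PySem.List.slice v none (some w) = v.take w.toNat from PySem.List.slice_to v hw]
  unfold pvS
  rw [show (0 : Int) + w = ((w.toNat : Nat) : Int) by omega,
      PySem.List.pyRange_zero_natCast, List.map_map]
  rw [← pv_sum_range_take v w.toNat]
  simp [Function.comp_def, PySem.List.pyGetD_natCast, List.getD_eq_getElem?_getD]

-- a running max over all-zero values stays 0
theorem pv_fold_zero (l : List Int) (f : Int → Int) (h : ∀ i ∈ l, f i = 0) :
    l.foldl (fun b i => max b (f i)) 0 = 0 := by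
  induction l with
  | nil => rfl
  | cons x t ih =>
    simp only [List.foldl_cons, h x List.mem_cons_self, max_self]
    exact ih (fun i hi => h i (List.mem_cons_of_mem x hi))

-- B's loop invariant: the pair fold carries (current window sum, running best)
theorem pv_invariant (v : List Int) (w : Int) (hw : 0 ≤ w) (m : Int) (hm : 1 ≤ m) :
    (PySem.List.pyRange 1 m 1).foldl
      (fun (p : Int × Int) i =>
        let s := p.1 + PySem.List.pyGetD v (i + w - 1) 0 - PySem.List.pyGetD v (i - 1) 0
        (s, if s > p.2 then s else p.2)) (pvS v w 0, pvS v w 0)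
    = (pvS v w (m - 1),
       (PySem.List.pyRange 1 m 1).foldl (fun b i => max b (pvS v w i)) (pvS v w 0)) := by
  induction m, hm using Int.le_induction with
  | base => simp [PySem.List.pyRange_one_eq_nil (by omega : (1:Int) ≤ 1)]
  | succ m hm1 ih =>
    rw [show m + 1 - 1 = m by ring,
        PySem.List.pyRange_one_succ_right (by omega : (1:Int) ≤ m),
        List.foldl_append, List.foldl_append, ih]
    simp only [List.foldl_cons, List.foldl_nil]
    have hs : pvS v w (m - 1) + PySem.List.pyGetD v (m + w - 1) 0
        - PySem.List.pyGetD v (m - 1) 0 = pvS v w m := by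
      have := pv_shift v w (m - 1) hw
      rw [show m - 1 + 1 = m by ring, show m - 1 + w = m + w - 1 by ring] at this
      omega
    rw [hs, pv_mx_eq]

-- A's result is the running max (starting at 0) over all window sums
theorem pv_solve_eq_max (v : List Int) (n w : Int) :
    solve v n w
      = (PySem.List.pyRange 0 (n - w) 1).foldl (fun b i => max b (pvS v w i)) 0 := by
  unfold solve
  apply PySem.List.foldl_congr_mem
  intro acc x _
  rw [pv_inner_eq, pv_mx_eq]

-- ===== VERDICT (by name: the statement is the Claim_ definition above) =====
theorem solve_spec : Claim_equal_solve := by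
  intro v n w _ _
  unfold Spec_solve solve_alt
  rw [pv_solve_eq_max]
  by_cases hm : n - w ≤ 0
  · simp [hm, PySem.List.pyRange_one_eq_nil (by omega : n - w ≤ 0)]
  · by_cases hw : w ≤ 0
    · -- B returns 0; every window is empty so A's running max stays 0
      rw [if_pos (Or.inr hw)]
      have hz : ∀ i ∈ PySem.List.pyRange 0 (n - w) 1, pvS v w i = 0 := by
        intro i _
        unfold pvS
        rw [PySem.List.pyRange_one_eq_nil (by omega : i + w ≤ i)]
        rfl
      exact pv_fold_zero _ _ hz
    · -- real case: split off window 0, use the sliding invariant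
      simp only [if_neg (by simp only [not_or, not_le] at hm hw ⊢; omega : ¬ (n - w ≤ 0 ∨ w ≤ 0))]
      rw [pv_slice_eq v w (by omega), pv_invariant v w (by omega) (n - w) (by omega)]
      simp only
      rw [PySem.List.pyRange_one_cons (by omega : (0:Int) < n - w), List.foldl_cons,
          show (0:Int) + 1 = 1 from rfl, pv_foldl_max_out, pv_mx_eq]
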